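-- pv_equiv track=rewrite | github.com/erikpeik/adventofcode | 2023/day3/part2.py | _getTheNumber
-- ===== SOURCE A (Python) =====
-- def _getTheNumber(line, j):
--     num = ""
--     while j > 0 and line[j - 1].isnumeric():
--         j -= 1
--     startj = j
--     while j < len(line) and line[j].isnumeric():
--         num += line[j]
--         j += 1
--     return int(num), (startj, j)
-- ===== SOURCE B (Python) =====
-- def _getTheNumber(line, j):
--     digits = "0123456789"
--     s = len(line[:j].rstrip(digits))
--     tail = line[s:]
--     num = tail[:len(tail) - len(tail.lstrip(digits))]
--     return int(num), (s, s + len(num))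
-- ===== Notes on version B (the rewrite author's own statement) =====
-- stated objective: simpler
-- what changed: A expands outward from j with two char-by-char while loops building the number string one character at a time; B has no loops at all: it computes the start as len(line[:j].rstrip(digits)), slices the tail, and takes its digit prefix via lstrip, returning int of that slice.
-- intended difference: For negative j (where A still returns), A's negative-index wraparound reads digits from the end of the line and concatenates them with digits at the start, returning a garbled number with a negative start index (e.g. A('1',-1)=(11,(-1,1))); B reads the negative index as Python does, as position len+j, and returns that digit run with its real bounds (B('1',-1)=(1,(0,1))), the intended value. — e.g. on _getTheNumber("1", -1): A returns (11, (-1, 1)), B returns (1, (0, 1))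
import Mathlib
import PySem

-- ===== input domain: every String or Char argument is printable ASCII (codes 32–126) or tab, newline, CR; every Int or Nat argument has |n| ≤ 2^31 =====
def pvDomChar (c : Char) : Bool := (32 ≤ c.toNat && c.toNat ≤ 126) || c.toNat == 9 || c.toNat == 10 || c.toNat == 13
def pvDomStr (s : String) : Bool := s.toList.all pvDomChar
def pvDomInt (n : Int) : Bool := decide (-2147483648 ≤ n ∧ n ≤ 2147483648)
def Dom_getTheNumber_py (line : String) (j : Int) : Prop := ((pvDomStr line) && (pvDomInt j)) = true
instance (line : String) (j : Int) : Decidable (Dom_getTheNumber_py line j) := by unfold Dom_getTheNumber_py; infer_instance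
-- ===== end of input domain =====

-- B re-implements A's two char-by-char while loops by whole-string slicing and rstrip/lstrip; simpler (no loops).
-- On negative j (A returns via negative-index wraparound) B intentionally differs — see D_ below.

-- ===== PORT A =====
-- 'line[k].isnumeric()' ported as PySem.Chars.isdigit on the indexed char: exact on the ASCII domain (Dom) these
-- claims are about; an out-of-range index (pyGet? = none) is Python's IndexError, excluded by Pre_, ported as 'false'.
def pyIsNum (l : List Char) (k : Int) : Bool :=
  ((PySem.List.pyGet? l k).map PySem.Chars.isdigit).getD false

-- 'while j > 0 and line[j-1].isnumeric(): j -= 1'  (fuel j.toNat: the loop decrements j and stops at j = 0)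
def aBack (fuel : Nat) (l : List Char) (j : Int) : Int :=
  match fuel with
  | 0 => j
  | f + 1 => if 0 < j ∧ pyIsNum l (j - 1) then aBack f l (j - 1) else j

-- 'while j < len(line) and line[j].isnumeric(): num += line[j]; j += 1'
-- (fuel (len - j).toNat: the loop increments j and stops at latest at j = len)
def aFwd (fuel : Nat) (l : List Char) (j : Int) (num : List Char) : List Char × Int :=
  match fuel with
  | 0 => (num, j)
  | f + 1 =>
    if j < (l.length : Int) ∧ pyIsNum l j then
      aFwd f l (j + 1) (num ++ [(PySem.List.pyGet? l j).getD ' '])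
    else (num, j)

def getTheNumber_py (line : String) (j : Int) : Int × (Int × Int) :=
  let l := line.toList
  let startj := aBack j.toNat l j
  let r := aFwd ((l.length - startj).toNat) l startj []
  -- 'int(num)': none is Python's ValueError on num = "", excluded by Pre_; the getD 0 is unreachable there
  ((PySem.Int.ofChars? r.1).getD 0, (startj, r.2))

-- ===== PORT B =====
-- hand ports of str.rstrip(chars) / str.lstrip(chars) (PySem.Chars only has the two-sided stripChars);
-- exact: each drops the maximal run of characters of 'chars' from its end, as CPython does
def pyRstripChars (s chars : List Char) : List Char :=
  (List.dropWhile (fun c => chars.contains c) s.reverse).reverse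
def pyLstripChars (s chars : List Char) : List Char :=
  List.dropWhile (fun c => chars.contains c) s

def getTheNumber_py_alt (line : String) (j : Int) : Int × (Int × Int) :=
  let digits := "0123456789".toList
  let l := line.toList
  let s : Int := ((pyRstripChars (PySem.List.slice l none (some j)) digits).length : Int)
  let tail := PySem.List.slice l (some s) none
  let num := PySem.List.slice tail none
      (some ((tail.length : Int) - ((pyLstripChars tail digits).length : Int)))
  ((PySem.Int.ofChars? num).getD 0, (s, s + (num.length : Int)))

-- ===== PRECONDITION & SPEC =====
-- Pre_ = exactly where A returns: |j| ≤ len, and the scan meets at least one digit — for 0 ≤ j a digit at j or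
-- j-1, for j < 0 (Python negative indexing) a digit at len+j; otherwise A raises IndexError or ValueError(int("")).
def Pre_getTheNumber_py (line : String) (j : Int) : Prop :=
  let l := line.toList;
  -(l.length : Int) ≤ j ∧ j ≤ (l.length : Int) ∧
    ((0 ≤ j ∧ ((j < (l.length : Int) ∧ PySem.Chars.isdigit (l.getD j.toNat ' ') = true) ∨
               (0 < j ∧ PySem.Chars.isdigit (l.getD (j - 1).toNat ' ') = true))) ∨
     (j < 0 ∧ PySem.Chars.isdigit (l.getD ((l.length : Int) + j).toNat ' ') = true))
instance (line : String) (j : Int) : Decidable (Pre_getTheNumber_py line j) := by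
  unfold Pre_getTheNumber_py; infer_instance

def pvWitness_getTheNumber_py : String × Int := ("a12", 1)

-- On negative j (with A still returning), A's negative-index wraparound reads digits from the END of the line and
-- concatenates them with digits at the START, returning a garbled number and a negative start index; B reads the
-- negative index as Python does (position len+j) and returns that digit run with its real bounds, the intended value.
def D_getTheNumber_py (line : String) (j : Int) : Prop := j < 0
instance (line : String) (j : Int) : Decidable (D_getTheNumber_py line j) := by
  unfold D_getTheNumber_py; infer_instance

def Spec_getTheNumber_py (line : String) (j : Int) (out : Int × (Int × Int)) : Prop :=
  ¬ D_getTheNumber_py line j → out = getTheNumber_py_alt line j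
instance (line : String) (j : Int) (out : Int × (Int × Int)) : Decidable (Spec_getTheNumber_py line j out) := by
  unfold Spec_getTheNumber_py; infer_instance

def pvDiffWitness_getTheNumber_py : String × Int := ("1", -1)
def pvDiffWitnessOut_getTheNumber_py : (Int × (Int × Int)) × (Int × (Int × Int)) :=
  ((11, (-1, 1)), (1, (0, 1)))

-- ===== CLAIM (what is proved, stated in full; the proofs are below) =====
def Claim_unchanged_getTheNumber_py : Prop := ∀ (line : String) (j : Int), Dom_getTheNumber_py line j → Pre_getTheNumber_py line j → Spec_getTheNumber_py line j (getTheNumber_py line j)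
def Claim_changed_getTheNumber_py : Prop := Dom_getTheNumber_py (pvDiffWitness_getTheNumber_py.1) (pvDiffWitness_getTheNumber_py.2) ∧ Pre_getTheNumber_py (pvDiffWitness_getTheNumber_py.1) (pvDiffWitness_getTheNumber_py.2) ∧ D_getTheNumber_py (pvDiffWitness_getTheNumber_py.1) (pvDiffWitness_getTheNumber_py.2) ∧ getTheNumber_py (pvDiffWitness_getTheNumber_py.1) (pvDiffWitness_getTheNumber_py.2) = pvDiffWitnessOut_getTheNumber_py.1 ∧ getTheNumber_py_alt (pvDiffWitness_getTheNumber_py.1) (pvDiffWitness_getTheNumber_py.2) = pvDiffWitnessOut_getTheNumber_py.2 ∧ pvDiffWitnessOut_getTheNumber_py.1 ≠ pvDiffWitnessOut_getTheNumber_py.2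
def Claim_exact_getTheNumber_py : Prop := ∀ (line : String) (j : Int), Dom_getTheNumber_py line j → Pre_getTheNumber_py line j → D_getTheNumber_py line j → getTheNumber_py line j ≠ getTheNumber_py_alt line j

-- ===== LEMMAS AND PROOFS =====

-- Python's rstrip/lstrip("0123456789") tests exactly '.isnumeric()' on the admitted (ASCII) characters
theorem digits_contains (c : Char) : (("0123456789".toList).contains c) = PySem.Chars.isdigit c := by
  rw [Bool.eq_iff_iff]
  simp only [show "0123456789".toList = ['0','1','2','3','4','5','6','7','8','9'] from rfl]
  simp only [List.contains_cons, List.contains_nil, Bool.or_eq_true, beq_iff_eq,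
    PySem.Chars.isdigit, Bool.and_eq_true, decide_eq_true_eq, Char.le_def,
    UInt32.le_iff_toNat_le, Char.ext_iff, UInt32.ext_iff, Bool.false_eq_true, or_false,
    show ('0').val.toNat = 48 from rfl, show ('1').val.toNat = 49 from rfl,
    show ('2').val.toNat = 50 from rfl, show ('3').val.toNat = 51 from rfl,
    show ('4').val.toNat = 52 from rfl, show ('5').val.toNat = 53 from rfl,
    show ('6').val.toNat = 54 from rfl, show ('7').val.toNat = 55 from rfl,
    show ('8').val.toNat = 56 from rfl, show ('9').val.toNat = 57 from rfl]
  omega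

theorem length_dropWhile_eq (p : Char → Bool) (l : List Char) :
    (l.dropWhile p).length = l.length - (l.takeWhile p).length := by
  have h := congrArg List.length (List.takeWhile_append_dropWhile (p := p) (l := l))
  simp only [List.length_append] at h
  omega

theorem take_length_takeWhile (p : Char → Bool) (l : List Char) :
    l.take (l.takeWhile p).length = l.takeWhile p :=
  (List.prefix_iff_eq_take.mp (List.takeWhile_prefix p)).symm

theorem pyIsNum_in_range (l : List Char) (n : Nat) (h : n < l.length) :
    pyIsNum l (n : Int) = PySem.Chars.isdigit l[n] := by
  simp [pyIsNum, PySem.List.pyGet?_natCast, List.getElem?_eq_getElem h]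

-- A's first loop walks left over exactly the maximal digit suffix of l.take n
theorem aBack_eq (l : List Char) (n : Nat) (h : n ≤ l.length) :
    aBack n l (n : Int) = (n : Int) - (((l.take n).reverse.takeWhile PySem.Chars.isdigit).length : Int) := by
  induction n with
  | zero => simp [aBack]
  | succ m ih =>
    have hm : m < l.length := by omega
    have hrev : (l.take (m + 1)).reverse = l[m] :: (l.take m).reverse := by
      rw [List.take_add_one, List.getElem?_eq_getElem hm]
      simp
    have hj : ((m + 1 : Nat) : Int) - 1 = (m : Nat) := by push_cast; ring
    by_cases hd : PySem.Chars.isdigit l[m] = true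
    · have hg : 0 < ((m + 1 : Nat) : Int) ∧ pyIsNum l (((m + 1 : Nat) : Int) - 1) = true := by
        constructor
        · exact_mod_cast Nat.succ_pos m
        · rw [hj, pyIsNum_in_range l m hm]; exact hd
      rw [aBack, if_pos hg, hj, ih (by omega), hrev, List.takeWhile_cons_of_pos hd]
      simp only [List.length_cons]
      push_cast
      omega
    · have hg : ¬ (0 < ((m + 1 : Nat) : Int) ∧ pyIsNum l (((m + 1 : Nat) : Int) - 1) = true) := by
        rw [hj, pyIsNum_in_range l m hm]
        exact fun hc => hd hc.2
      rw [aBack, if_neg hg, hrev, List.takeWhile_cons_of_neg (by simpa using hd)]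
      simp

-- A's second loop collects exactly the maximal digit prefix of l.drop s
theorem aFwd_eq (l : List Char) (fuel : Nat) :
    ∀ (s : Nat) (num : List Char), l.length ≤ s + fuel →
      aFwd fuel l (s : Int) num =
        (num ++ (l.drop s).takeWhile PySem.Chars.isdigit,
         (s : Int) + (((l.drop s).takeWhile PySem.Chars.isdigit).length : Int)) := by
  induction fuel with
  | zero =>
    intro s num hf
    have : l.drop s = [] := List.drop_eq_nil_of_le (by omega)
    simp [aFwd, this]
  | succ f ih =>
    intro s num hf
    by_cases hs : s < l.length
    · have hdrop : l.drop s = l[s] :: l.drop (s + 1) := List.drop_eq_getElem_cons hs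
      by_cases hd : PySem.Chars.isdigit l[s] = true
      · have hg : (s : Int) < (l.length : Int) ∧ pyIsNum l (s : Int) = true := by
          refine ⟨by exact_mod_cast hs, ?_⟩
          rw [pyIsNum_in_range l s hs]; exact hd
        have hget : (PySem.List.pyGet? l (s : Int)).getD ' ' = l[s] := by
          simp [PySem.List.pyGet?_natCast, List.getElem?_eq_getElem hs]
        rw [aFwd, if_pos hg, hget, show (s : Int) + 1 = ((s + 1 : Nat) : Int) by push_cast; ring,
          ih (s + 1) (num ++ [l[s]]) (by omega), hdrop, List.takeWhile_cons_of_pos hd]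
        simp only [List.append_assoc, List.singleton_append, List.length_cons, Prod.mk.injEq,
          true_and]
        push_cast
        ring
      · have hg : ¬ ((s : Int) < (l.length : Int) ∧ pyIsNum l (s : Int) = true) := by
          rw [pyIsNum_in_range l s hs]
          exact fun hc => hd hc.2
        rw [aFwd, if_neg hg, hdrop, List.takeWhile_cons_of_neg (by simpa using hd)]
        simp
    · have hg : ¬ ((s : Int) < (l.length : Int) ∧ pyIsNum l (s : Int) = true) := by
        intro hc
        exact hs (by exact_mod_cast hc.1)
      have hdrop : l.drop s = [] := List.drop_eq_nil_of_le (by omega)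
      rw [aFwd, if_neg hg, hdrop]
      simp

theorem digits_pred_eq :
    (fun c => ("0123456789".toList).contains c) = PySem.Chars.isdigit :=
  funext digits_contains

theorem getTheNumber_py_spec : Claim_unchanged_getTheNumber_py := by
  intro line j _hdom hpre hnd
  simp only [D_getTheNumber_py, not_lt] at hnd
  obtain ⟨-, hle, -⟩ := hpre
  set l := line.toList with hl
  -- names and facts
  obtain ⟨n, rfl⟩ : ∃ n : Nat, j = (n : Int) := ⟨j.toNat, (Int.toNat_of_nonneg hnd).symm⟩
  have hn : n ≤ l.length := by exact_mod_cast hle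
  set R := ((l.take n).reverse.takeWhile PySem.Chars.isdigit).length with hR
  have hRn : R ≤ n := by
    have h1 := (List.takeWhile_prefix (l := (l.take n).reverse) PySem.Chars.isdigit).length_le
    simp only [List.length_reverse, List.length_take] at h1
    omega
  set T := (l.drop (n - R)).takeWhile PySem.Chars.isdigit with hT
  -- A's side
  have hcast : (n : Int) - (R : Int) = ((n - R : Nat) : Int) := by push_cast [hRn]; ring
  have hA : getTheNumber_py line ((n : Nat) : Int) =
      ((PySem.Int.ofChars? T).getD 0, (((n - R : Nat) : Int), ((n - R : Nat) : Int) + (T.length : Int))) := by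
    simp only [getTheNumber_py]
    rw [← hl, show ((n : Nat) : Int).toNat = n from by omega, aBack_eq l n hn, ← hR, hcast,
      show ((l.length : Int) - ((n - R : Nat) : Int)).toNat = l.length - (n - R) from by omega,
      aFwd_eq l (l.length - (n - R)) (n - R) [] (by omega), ← hT]
    simp
  -- B's side
  have hB : getTheNumber_py_alt line ((n : Nat) : Int) =
      ((PySem.Int.ofChars? T).getD 0, (((n - R : Nat) : Int), ((n - R : Nat) : Int) + (T.length : Int))) := by
    simp only [getTheNumber_py_alt]
    rw [← hl]
    simp only [pyRstripChars, pyLstripChars, digits_pred_eq, PySem.List.slice_to_natCast]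
    have hs : (((List.dropWhile PySem.Chars.isdigit (l.take n).reverse).reverse).length : Int)
        = ((n - R : Nat) : Int) := by
      rw [List.length_reverse, length_dropWhile_eq]
      simp only [List.length_reverse, List.length_take, ← hR]
      congr 1
      omega
    rw [hs, PySem.List.slice_from_natCast]
    have hlen : ((l.drop (n - R)).length : Int)
        - ((List.dropWhile PySem.Chars.isdigit (l.drop (n - R))).length : Int) = (T.length : Int) := by
      have hle := (List.takeWhile_prefix (l := l.drop (n - R)) PySem.Chars.isdigit).length_le
      rw [length_dropWhile_eq, hT]
      omega
    rw [hlen, show (T.length : Int) = ((T.length : Nat) : Int) from rfl, PySem.List.slice_to_natCast,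
      hT, take_length_takeWhile]
  rw [hA, hB]

-- ===== VERDICT (by name: the statement is the Claim_ definition above) =====
theorem getTheNumber_py_changed : Claim_changed_getTheNumber_py := by
  unfold Claim_changed_getTheNumber_py; decide

theorem getTheNumber_py_tight : Claim_exact_getTheNumber_py := by
  intro line j _hdom _hpre hd heq
  rw [D_getTheNumber_py] at hd
  have h2 := congrArg (fun p => p.2.1) heq
  have hA : (getTheNumber_py line j).2.1 = j := by
    simp only [getTheNumber_py, show j.toNat = 0 from by omega]
    simp [aBack]
  have hB : 0 ≤ (getTheNumber_py_alt line j).2.1 := by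
    simp only [getTheNumber_py_alt]
    simp
  simp only [hA] at h2
  omega
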